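-- pv_equiv track=rewrite | github.com/quoth-le-corbeau/advent_of_code | advent_2016/day_4/solutions.py | _is_real
-- ===== SOURCE A (Python) =====
-- from collections import defaultdict
--
-- def _is_real(name: str, checksum: str) -> bool:
--     count_look_up = defaultdict(set)
--     for char in name:
--         count_look_up[name.count(char)].add(char)
--     calculated_full_checksum = ""
--     for count in sorted(count_look_up, reverse=True):
--         chars = count_look_up[count]
--         calculated_full_checksum += "".join(sorted(list(chars)))
--     calculated_checksum = calculated_full_checksum[:5]
--     return calculated_checksum == checksum
-- ===== SOURCE B (Python) =====
-- def _is_real(name: str, checksum: str) -> bool: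
--     freq = {}
--     for char in name:
--         freq[char] = freq.get(char, 0) + 1
--     calculated_checksum = "".join(
--         sorted(freq, key=lambda c: (-freq[c], c))
--     )[:5]
--     return calculated_checksum == checksum
-- ===== Notes on version B (the rewrite author's own statement) =====
-- stated objective: faster
-- what changed: Replaces A's defaultdict(set) bucket index keyed by name.count(char) (a full-string count per character plus a loop over descending counts) by a single-pass frequency dict and one composite-key sort of the distinct characters by (-freq[c], c).
import Mathlib
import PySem

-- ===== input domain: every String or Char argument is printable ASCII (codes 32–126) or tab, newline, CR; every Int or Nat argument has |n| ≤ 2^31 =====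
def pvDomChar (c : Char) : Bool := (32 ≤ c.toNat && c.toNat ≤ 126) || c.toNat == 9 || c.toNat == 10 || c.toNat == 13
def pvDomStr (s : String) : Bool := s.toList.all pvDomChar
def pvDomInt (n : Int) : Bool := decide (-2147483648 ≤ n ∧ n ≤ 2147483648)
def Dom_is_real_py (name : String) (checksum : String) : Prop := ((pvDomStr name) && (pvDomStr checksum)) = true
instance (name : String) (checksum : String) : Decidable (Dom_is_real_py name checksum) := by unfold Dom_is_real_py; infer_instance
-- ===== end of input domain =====

-- B replaces A's count→set bucket dict and descending loop over counts by a frequency dict and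
-- one composite-key sort of the distinct characters (objective: simpler/idiomatic).

-- ===== PORT A =====
-- A: defaultdict(set) keyed by name.count(char); then concatenate sorted char-sets for counts in descending order; compare first 5.
def is_real_py (name : String) (checksum : String) : Bool :=
  let cs := name.toList
  let countLookUp : PySem.Dict Int (PySem.Set Char) :=
    cs.foldl (fun d char =>
      d.insert ((PySem.Chars.count cs [char] : Int))
        ((d.getD ((PySem.Chars.count cs [char] : Int)) PySem.Set.empty).add char)) PySem.Dict.empty
  let calculatedFull : List Char :=
    (PySem.List.sorted countLookUp.keys (fun k => k) true).foldl
      (fun acc count =>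
        acc ++ PySem.List.sorted (countLookUp.getD count PySem.Set.empty) (fun c => c) false) []
  let calculated := PySem.List.slice calculatedFull none (some 5)
  decide (calculated = checksum.toList)

-- ===== PORT B =====
-- B: frequency dict built in one pass; sort its keys by (-freq[c], c); take the first 5.
def is_real_py_alt (name : String) (checksum : String) : Bool :=
  let cs := name.toList
  let freq : PySem.Dict Char Int :=
    cs.foldl (fun d char => d.insert char (d.getD char 0 + 1)) PySem.Dict.empty
  let calculated := PySem.List.slice
    (PySem.List.sorted2 freq.keys (fun c => -(freq.getD c 0)) (fun c => c) false) none (some 5)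
  decide (calculated = checksum.toList)

-- ===== PRECONDITION & SPEC =====
def Spec_is_real_py (name : String) (checksum : String) (out : Bool) : Prop := out = is_real_py_alt name checksum
instance (name : String) (checksum : String) (out : Bool) : Decidable (Spec_is_real_py name checksum out) := by unfold Spec_is_real_py; infer_instance

-- ===== CLAIM (what is proved, stated in full; the proofs are below) =====
def Claim_equal_is_real_py : Prop := ∀ (name : String) (checksum : String), Dom_is_real_py name checksum → Spec_is_real_py name checksum (is_real_py name checksum)

-- ===== LEMMAS AND PROOFS =====

-- the single composite sort key both checksum orders realise: count descending, then char ascending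
def pvKey (cs : List Char) (c : Char) : Int := -(cs.count c : Int) * 1114112 + (c.toNat : Int)

lemma char_toNat_lt (c : Char) : c.toNat < 1114112 := by
  have := c.valid
  unfold Nat.isValidChar UInt32.isValidChar at this
  unfold Char.toNat
  omega

lemma char_lt_iff (a b : Char) : a < b ↔ a.toNat < b.toNat := Iff.rfl

lemma pvKey_lt_iff (cs : List Char) (a b : Char) :
    pvKey cs a < pvKey cs b ↔
      ((cs.count b : Int) < (cs.count a : Int) ∨ ((cs.count a : Int) = (cs.count b : Int) ∧ a < b)) := by
  have ha := char_toNat_lt a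
  have hb := char_toNat_lt b
  rw [char_lt_iff]
  unfold pvKey
  omega

-- Python str.count of a single character is the element count
lemma chars_count_singleton (cs : List Char) (c : Char) :
    PySem.Chars.count cs [c] = cs.count c := by
  have go : ∀ (l : List Char) (fuel acc : Nat), l.length ≤ fuel →
      PySem.Chars.count.go [c] fuel l acc = acc + l.count c := by
    intro l
    induction l with
    | nil => intro fuel acc _; cases fuel <;> simp [PySem.Chars.count.go]
    | cons h t ih =>
      intro fuel acc hle
      cases fuel with
      | zero => simp at hle
      | succ n =>
        by_cases hc : c = h
        · subst hc
          simp only [PySem.Chars.count.go, List.isPrefixOf, BEq.rfl, Bool.and_eq_true,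
            and_self, if_true, List.length_cons, List.length_nil,
            List.drop_succ_cons, List.drop_zero]
          rw [ih n (acc + 1) (by simpa using hle), List.count_cons_self]
          omega
        · simp only [PySem.Chars.count.go, List.isPrefixOf, Bool.and_eq_true, beq_iff_eq,
            and_true]
          rw [if_neg (by simpa using hc), ih n acc (by simpa using hle),
            List.count_cons_of_ne (Ne.symm hc)]
  simp [PySem.Chars.count, go cs cs.length 0 le_rfl]

-- the value a grouping fold leaves at key k is the fold of Set.add over the matching elements
lemma getD_group (F : Char → Int) (l : List Char) :
    ∀ (d : PySem.Dict Int (PySem.Set Char)) (k : Int),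
      (l.foldl (fun d ch => d.insert (F ch) ((d.getD (F ch) PySem.Set.empty).add ch)) d).getD k PySem.Set.empty
        = (l.filter (fun ch => F ch == k)).foldl PySem.Set.add (d.getD k PySem.Set.empty) := by
  induction l with
  | nil => intro d k; simp
  | cons c t ih =>
    intro d k
    rw [List.foldl_cons, ih, List.filter_cons]
    by_cases h : F c = k
    · simp [h]
    · simp [h, PySem.Dict.getD_insert, Ne.symm h]

-- B's frequency loop is collections.Counter
lemma freq_eq_counter (cs : List Char) :
    cs.foldl (fun d char => d.insert char (d.getD char 0 + 1)) PySem.Dict.empty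
      = PySem.Dict.counter cs := by
  rw [PySem.Dict.counter_eq_foldl]; rfl

-- B's two-component sort is the one-key sort by pvKey
lemma sorted2_eq_sorted_pvKey (cs xs : List Char) :
    PySem.List.sorted2 xs (fun c => -((PySem.Dict.counter cs).getD c 0)) (fun c => c) false
      = PySem.List.sorted xs (pvKey cs) false := by
  have hbefore : (fun a b : Char =>
        (decide (-((PySem.Dict.counter cs).getD a 0) < -((PySem.Dict.counter cs).getD b 0)) ||
          (!decide (-((PySem.Dict.counter cs).getD b 0) < -((PySem.Dict.counter cs).getD a 0)) &&
            decide (a < b))))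
      = fun a b => decide (pvKey cs a < pvKey cs b) := by
    funext a b
    have ha := char_toNat_lt a
    have hb := char_toNat_lt b
    have hc := char_lt_iff a b
    simp only [PySem.Dict.getD_counter, pvKey, hc]
    simp only [← decide_not, ← Bool.decide_and, ← Bool.decide_or]
    rw [decide_eq_decide]
    omega
  rw [PySem.List.sorted_eq_foldl_insertBy]
  show xs.foldl (fun acc x => PySem.List.insertBy (fun a b =>
      (decide (-((PySem.Dict.counter cs).getD a 0) < -((PySem.Dict.counter cs).getD b 0)) ||
        (!decide (-((PySem.Dict.counter cs).getD b 0) < -((PySem.Dict.counter cs).getD a 0)) &&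
          decide (a < b)))) x acc) [] = _
  rw [hbefore]

-- the concatenation of the descending-count buckets is the pvKey-sorted distinct-character list
lemma buckets_eq_sorted (cs : List Char) :
    ((PySem.List.sorted (PySem.Set.ofList (cs.map (fun c => (cs.count c : Int)))) (fun k => k) true).flatMap
        (fun k => PySem.List.sorted (PySem.Set.ofList (cs.filter (fun ch => ((cs.count ch : Int)) == k))) (fun c => c) false))
      = PySem.List.sorted (PySem.Set.ofList cs) (pvKey cs) false := by
  refine (PySem.List.sorted_eq_of_perm_of_pairwise_lt _ _ _ ?_ ?_).symm
  · -- permutation: both list the distinct characters of cs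
    rw [List.perm_ext_iff_of_nodup]
    · intro a
      simp only [List.mem_flatMap, PySem.List.mem_sorted, PySem.Set.mem_ofList,
        List.mem_filter, List.mem_map]
      constructor
      · rintro ⟨k, -, ha, -⟩; exact ha
      · intro ha; exact ⟨(cs.count a : Int), ⟨a, ha, rfl⟩, ha, by simp⟩
    · rw [List.nodup_flatMap]
      refine ⟨fun k _ => ((PySem.List.sorted_perm _ _ _).nodup_iff).mpr (PySem.Set.nodup_ofList _), ?_⟩
      have hnd : (PySem.List.sorted (PySem.Set.ofList (cs.map (fun c => (cs.count c : Int)))) (fun k => k) true).Nodup :=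
        ((PySem.List.sorted_perm _ _ _).nodup_iff).mpr (PySem.Set.nodup_ofList _)
      refine hnd.imp ?_
      intro k₁ k₂ hne x hx hy
      rw [PySem.List.mem_sorted, PySem.Set.mem_ofList, List.mem_filter] at hx hy
      exact hne (by rw [← (beq_iff_eq ..).mp hx.2, ← (beq_iff_eq ..).mp hy.2])
    · exact PySem.Set.nodup_ofList _
  · -- strictly increasing in pvKey
    rw [List.pairwise_flatMap]
    constructor
    · intro k _
      have h₁ := PySem.List.sorted_pairwise (PySem.Set.ofList (cs.filter (fun ch => ((cs.count ch : Int)) == k))) (fun c => c)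
      have h₂ : (PySem.List.sorted (PySem.Set.ofList (cs.filter (fun ch => ((cs.count ch : Int)) == k))) (fun c => c) false).Nodup :=
        ((PySem.List.sorted_perm _ _ _).nodup_iff).mpr (PySem.Set.nodup_ofList _)
      refine List.Pairwise.imp_of_mem ?_ (h₁.and h₂)
      intro a b ha hb hab
      rw [PySem.List.mem_sorted, PySem.Set.mem_ofList, List.mem_filter] at ha hb
      have ha2 := (beq_iff_eq ..).mp ha.2
      have hb2 := (beq_iff_eq ..).mp hb.2
      rw [pvKey_lt_iff]
      exact Or.inr ⟨by omega, lt_of_le_of_ne hab.1 hab.2⟩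
    · have h₁ := PySem.List.sorted_pairwise_rev (PySem.Set.ofList (cs.map (fun c => (cs.count c : Int)))) (fun k => k)
      have h₂ : (PySem.List.sorted (PySem.Set.ofList (cs.map (fun c => (cs.count c : Int)))) (fun k => k) true).Nodup :=
        ((PySem.List.sorted_perm _ _ _).nodup_iff).mpr (PySem.Set.nodup_ofList _)
      refine (h₁.and h₂).imp ?_
      rintro k₁ k₂ ⟨hle, hne⟩ x hx y hy
      rw [PySem.List.mem_sorted, PySem.Set.mem_ofList, List.mem_filter] at hx hy
      have hx2 := (beq_iff_eq ..).mp hx.2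
      have hy2 := (beq_iff_eq ..).mp hy.2
      rw [pvKey_lt_iff]
      left
      omega

-- ===== VERDICT (by name: the statement is the Claim_ definition above) =====
theorem is_real_py_spec : Claim_equal_is_real_py := by
  intro name checksum _
  unfold Spec_is_real_py is_real_py is_real_py_alt
  simp only [chars_count_singleton, PySem.Dict.keys_foldl_insert_key, PySem.Dict.keys_empty,
    PySem.Set.update_nil_left, getD_group, PySem.Dict.getD_empty, PySem.List.foldl_append_eq_flatMap, List.nil_append, freq_eq_counter, PySem.Dict.keys_counter,
    sorted2_eq_sorted_pvKey]
  simp only [PySem.Set.empty, ← PySem.Set.ofList_eq_foldl, buckets_eq_sorted]
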